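-- pv_equiv track=rewrite | github.com/nmichiels/adventofcode2019 | day4/advent4.py | checkRuleDouble
-- ===== SOURCE A (Python) =====
-- def checkRuleDouble(digits):
--
--     for i in range(0, len(digits)-1):
--         if digits[i] == digits[i+1]:
--
--             if i-1 >= 0 and digits[i] == digits[i-1]:
--                 continue
--             elif i+2  < len(digits) and digits[i] == digits[i+2]:
--                 continue
--             else:
--                 return True
--     return False
-- ===== SOURCE B (Python) =====
-- def checkRuleDouble(digits):
--     # Run-scan with two indices: jump over each maximal run of equal
--     # digits at once and test whether its length is exactly 2.
--     i, n = 0, len(digits)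
--     while i < n:
--         j = i + 1
--         while j < n and digits[j] == digits[i]:
--             j += 1
--         if j - i == 2:
--             return True
--         i = j
--     return False
-- ===== Notes on version B (the rewrite author's own statement) =====
-- stated objective: alternative
-- what changed: Replaces A's per-index neighbour scan with left/right lookahead by a two-pointer run scan that jumps over each maximal run of equal digits and tests its length for == 2.
import Mathlib
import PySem

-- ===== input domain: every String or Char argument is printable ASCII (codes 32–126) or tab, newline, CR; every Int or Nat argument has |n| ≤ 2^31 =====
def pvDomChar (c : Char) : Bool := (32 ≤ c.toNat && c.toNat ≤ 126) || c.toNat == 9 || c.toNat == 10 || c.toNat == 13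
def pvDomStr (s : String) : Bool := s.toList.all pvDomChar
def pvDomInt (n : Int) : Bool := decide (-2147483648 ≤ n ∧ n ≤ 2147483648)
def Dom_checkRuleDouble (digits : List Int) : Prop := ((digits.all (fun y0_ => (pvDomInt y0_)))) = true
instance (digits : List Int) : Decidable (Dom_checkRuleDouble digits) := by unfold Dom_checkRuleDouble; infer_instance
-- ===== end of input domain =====

-- B replaces A's per-index neighbour scan (with left/right lookahead) by a two-pointer
-- run scan over maximal runs of equal digits; alternative decomposition, same cost.

-- ===== PORT A =====
-- A's for-loop over range(0, len-1) with early return, as recursion on the loop index;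
-- the fuel argument (digits.length at the call site) is only a structural totality
-- guard: it never runs out before the loop's own exit test (i < len-1) fails.
-- All Python index accesses in the loop body are guarded in range, so getD is exact
-- here; Python's 'i-1 >= 0' becomes '1 ≤ i' for the Nat loop index.
def loopA (digits : List Int) : Nat → Nat → Bool
  | 0, _ => false
  | fuel+1, i =>
    if i < digits.length - 1 then
      if digits.getD i 0 = digits.getD (i+1) 0 then
        if 1 ≤ i ∧ digits.getD i 0 = digits.getD (i-1) 0 then
          loopA digits fuel (i+1)
        else if i + 2 < digits.length ∧ digits.getD i 0 = digits.getD (i+2) 0 then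
          loopA digits fuel (i+1)
        else true
      else loopA digits fuel (i+1)
    else false

def checkRuleDouble (digits : List Int) : Bool := loopA digits digits.length 0

-- ===== PORT B =====
-- inner while loop: advance j to the end of the maximal run of digits[i]
-- (fuel = digits.length is again only a structural totality guard)
def runEndB (digits : List Int) (i : Nat) : Nat → Nat → Nat
  | 0, j => j
  | fuel+1, j =>
    if j < digits.length ∧ digits.getD j 0 = digits.getD i 0 then
      runEndB digits i fuel (j+1)
    else j

-- outer while loop
def loopB (digits : List Int) : Nat → Nat → Bool
  | 0, _ => false
  | fuel+1, i =>
    if i < digits.length then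
      let j := runEndB digits i digits.length (i+1)
      if j - i = 2 then true else loopB digits fuel j
    else false

def checkRuleDouble_alt (digits : List Int) : Bool := loopB digits digits.length 0

-- ===== PRECONDITION & SPEC =====
def Spec_checkRuleDouble (digits : List Int) (out : Bool) : Prop := out = checkRuleDouble_alt digits
instance (digits : List Int) (out : Bool) : Decidable (Spec_checkRuleDouble digits out) := by unfold Spec_checkRuleDouble; infer_instance

-- ===== CLAIM (what is proved, stated in full; the proofs are below) =====
def Claim_equal_checkRuleDouble : Prop := ∀ (digits : List Int), Dom_checkRuleDouble digits → Spec_checkRuleDouble digits (checkRuleDouble digits)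

-- ===== LEMMAS AND PROOFS =====

-- fuel irrelevance: any fuel ≥ the remaining trip count computes the same value
theorem loopA_fuel (digits : List Int) :
    ∀ f g i, digits.length ≤ f + i → digits.length ≤ g + i →
      loopA digits f i = loopA digits g i := by
  intro f
  induction f with
  | zero =>
    intro g i hf hg
    cases g with
    | zero => rfl
    | succ g => rw [loopA, loopA, if_neg (by omega)]
  | succ f ih =>
    intro g i hf hg
    cases g with
    | zero => rw [loopA, loopA, if_neg (by omega)]
    | succ g =>
      rw [loopA, loopA]
      by_cases hg1 : i < digits.length - 1
      · rw [if_pos hg1, if_pos hg1]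
        have hr := ih g (i+1) (by omega) (by omega)
        by_cases h1 : digits.getD i 0 = digits.getD (i+1) 0
        · rw [if_pos h1, if_pos h1]
          by_cases h2 : 1 ≤ i ∧ digits.getD i 0 = digits.getD (i-1) 0
          · rw [if_pos h2, if_pos h2, hr]
          · rw [if_neg h2, if_neg h2]
            by_cases h3 : i + 2 < digits.length ∧ digits.getD i 0 = digits.getD (i+2) 0
            · rw [if_pos h3, if_pos h3, hr]
            · rw [if_neg h3, if_neg h3]
        · rw [if_neg h1, if_neg h1, hr]
      · rw [if_neg hg1, if_neg hg1]

theorem runEndB_ge (digits : List Int) (i : Nat) :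
    ∀ f j, j ≤ runEndB digits i f j := by
  intro f
  induction f with
  | zero => intro j; exact Nat.le_refl j
  | succ f ih =>
    intro j
    rw [runEndB]
    split
    · exact Nat.le_trans (Nat.le_succ j) (ih (j+1))
    · exact Nat.le_refl j

theorem runEndB_le (digits : List Int) (i : Nat) :
    ∀ f j, j ≤ digits.length → runEndB digits i f j ≤ digits.length := by
  intro f
  induction f with
  | zero => intro j h; exact h
  | succ f ih =>
    intro j h
    rw [runEndB]
    split
    · exact ih (j+1) (by omega)
    · exact h

theorem runEndB_eq (digits : List Int) (i : Nat) :
    ∀ f j k, j ≤ k → k < runEndB digits i f j →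
      digits.getD k 0 = digits.getD i 0 := by
  intro f
  induction f with
  | zero =>
    intro j k h1 h2
    rw [show runEndB digits i 0 j = j from rfl] at h2
    omega
  | succ f ih =>
    intro j k h1 h2
    rw [runEndB] at h2
    split at h2
    · rcases Nat.eq_or_lt_of_le h1 with h | h
      · subst h; exact (by assumption : _ ∧ _).2
      · exact ih (j+1) k h h2
    · omega

theorem runEndB_stop (digits : List Int) (i : Nat) :
    ∀ f j, j ≤ digits.length → digits.length ≤ f + j →
      runEndB digits i f j = digits.length ∨
        digits.getD (runEndB digits i f j) 0 ≠ digits.getD i 0 := by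
  intro f
  induction f with
  | zero =>
    intro j hj hf
    rw [show runEndB digits i 0 j = j from rfl]
    left; omega
  | succ f ih =>
    intro j hj hf
    rw [runEndB]
    by_cases h : j < digits.length ∧ digits.getD j 0 = digits.getD i 0
    · rw [if_pos h]; exact ih (j+1) (by omega) (by omega)
    · rw [if_neg h]
      rcases Nat.lt_or_ge j digits.length with h1 | h1
      · right; intro he; exact h ⟨h1, he⟩
      · left; omega

theorem loopA_ge (digits : List Int) (f i : Nat) (h : digits.length - 1 ≤ i) :
    loopA digits f i = false := by
  cases f with
  | zero => rfl
  | succ f => rw [loopA, if_neg (by omega)]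

theorem loopB_ge (digits : List Int) (f i : Nat) (h : digits.length ≤ i) :
    loopB digits f i = false := by
  cases f with
  | zero => rfl
  | succ f => rw [loopB, if_neg (by omega)]

-- inside a maximal run [i, e): the loop body always continues
theorem loopA_run (digits : List Int) (i e : Nat) (he : e ≤ digits.length)
    (heq : ∀ m, i ≤ m → m < e → digits.getD m 0 = digits.getD i 0)
    (hstop : e = digits.length ∨ digits.getD e 0 ≠ digits.getD i 0)
    (f k : Nat) (hf : digits.length ≤ f + k) (hk1 : i < k) (hk2 : k ≤ e) :
    loopA digits f k = loopA digits f e := by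
  rcases Nat.eq_or_lt_of_le hk2 with h | h
  · subst h; rfl
  · have hf1 : f ≠ 0 := by omega
    obtain ⟨f', rfl⟩ := Nat.exists_eq_succ_of_ne_zero hf1
    have step : loopA digits (f'+1) k = loopA digits (f'+1) (k+1) := by
      by_cases hg : k < digits.length - 1
      · rw [loopA, if_pos hg]
        have hr := loopA_fuel digits f' (f'+1) (k+1) (by omega) (by omega)
        by_cases h1 : digits.getD k 0 = digits.getD (k+1) 0
        · have hleft : 1 ≤ k ∧ digits.getD k 0 = digits.getD (k-1) 0 := by
            constructor
            · omega
            · rw [heq k (by omega) h, heq (k-1) (by omega) (by omega)]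
          rw [if_pos h1, if_pos hleft, hr]
        · rw [if_neg h1, hr]
      · rw [loopA_ge digits (f'+1) k (by omega),
          loopA_ge digits (f'+1) (k+1) (by omega)]
    rw [step]
    exact loopA_run digits i e he heq hstop (f'+1) (k+1) (by omega) (by omega) h
termination_by e - k
decreasing_by omega

-- main invariant: at any run start, the two loops agree
theorem loopAB (digits : List Int) (f i : Nat) (hf : digits.length ≤ f + i)
    (hrs : i = 0 ∨ digits.length ≤ i ∨ digits.getD (i-1) 0 ≠ digits.getD i 0) :
    loopA digits f i = loopB digits f i := by
  by_cases hn : i < digits.length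
  case neg =>
    rw [loopA_ge digits f i (by omega), loopB_ge digits f i (by omega)]
  case pos =>
    have hf1 : f ≠ 0 := by omega
    obtain ⟨f', rfl⟩ := Nat.exists_eq_succ_of_ne_zero hf1
    have hge := runEndB_ge digits i digits.length (i+1)
    have hle := runEndB_le digits i digits.length (i+1) (by omega)
    have heq0 := runEndB_eq digits i digits.length (i+1)
    have hstop0 := runEndB_stop digits i digits.length (i+1) (by omega) (by omega)
    set e := runEndB digits i digits.length (i+1) with hedef
    have heq : ∀ m, i ≤ m → m < e → digits.getD m 0 = digits.getD i 0 := by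
      intro m hm1 hm2
      rcases Nat.eq_or_lt_of_le hm1 with h | h
      · subst h; rfl
      · exact heq0 m h hm2
    have hstop : e = digits.length ∨ digits.getD e 0 ≠ digits.getD i 0 := hstop0
    have hleft : ¬ (1 ≤ i ∧ digits.getD i 0 = digits.getD (i-1) 0) := by
      rintro ⟨h1, h2⟩
      rcases hrs with h | h | h
      · omega
      · omega
      · exact h h2.symm
    have hB : loopB digits (f'+1) i = if e - i = 2 then true else loopB digits f' e := by
      rw [loopB, if_pos hn]
    rw [hB]
    rcases Nat.lt_trichotomy e (i+2) with hr | hr | hr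
    · -- run of length 1: e = i+1
      rw [if_neg (by omega : ¬ e - i = 2)]
      by_cases hg : i < digits.length - 1
      · have hd : ¬ digits.getD i 0 = digits.getD (i+1) 0 := by
          rcases hstop with h | h
          · omega
          · have he1 : e = i + 1 := by omega
            rw [he1] at h; exact fun hc => h hc.symm
        rw [loopA, if_pos hg, if_neg hd, show e = i + 1 by omega]
        refine loopAB digits f' (i+1) (by omega) (Or.inr (Or.inr ?_))
        show digits.getD i 0 ≠ digits.getD (i+1) 0
        exact hd
      · rw [loopA_ge digits (f'+1) i (by omega), loopB_ge digits f' e (by omega)]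
    · -- run of length exactly 2: A returns true at i, B sees e - i = 2
      have hg : i < digits.length - 1 := by omega
      have hd : digits.getD i 0 = digits.getD (i+1) 0 :=
        (heq (i+1) (by omega) (by omega)).symm
      have hright : ¬ (i + 2 < digits.length ∧ digits.getD i 0 = digits.getD (i+2) 0) := by
        rintro ⟨h1, h2⟩
        rcases hstop with h | h
        · omega
        · rw [← hr] at h1 h2; exact h h2.symm
      rw [loopA, if_pos hg, if_pos hd, if_neg hleft, if_neg hright,
        if_pos (by omega : e - i = 2)]
    · -- run of length ≥ 3: A continues through the run, B jumps to e
      have hg : i < digits.length - 1 := by omega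
      have hd : digits.getD i 0 = digits.getD (i+1) 0 :=
        (heq (i+1) (by omega) (by omega)).symm
      have hright : i + 2 < digits.length ∧ digits.getD i 0 = digits.getD (i+2) 0 :=
        ⟨by omega, (heq (i+2) (by omega) (by omega)).symm⟩
      rw [loopA, if_pos hg, if_pos hd, if_neg hleft, if_pos hright,
        loopA_run digits i e hle heq hstop f' (i+1) (by omega) (by omega) (by omega),
        if_neg (by omega : ¬ e - i = 2)]
      refine loopAB digits f' e (by omega) (Or.inr ?_)
      rcases hstop with h | h
      · exact Or.inl (by omega)
      · refine Or.inr ?_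
        rw [heq (e-1) (by omega) (by omega)]
        exact fun hc => h hc.symm
termination_by digits.length - i
decreasing_by all_goals omega

-- ===== VERDICT (by name: the statement is the Claim_ definition above) =====
theorem checkRuleDouble_spec : Claim_equal_checkRuleDouble := by
  intro digits _
  unfold Spec_checkRuleDouble checkRuleDouble checkRuleDouble_alt
  exact loopAB digits digits.length 0 (by omega) (Or.inl rfl)
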